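-- pv_equiv track=rewrite | github.com/ffigari/rastreador-ocular | src/experimentation/first_instance/summary.py | look_for_response
-- ===== SOURCE A (Python) =====
-- def look_for_response(inlier_ts):
--     without_response_ts = [
--         t for t in inlier_ts
--         if not t['subject_reacted']
--     ]
--     correct_ts = [
--         t for t in inlier_ts
--         if t['subject_reacted'] and t['correct_reaction']
--     ]
--     incorrect_ts = [
--         t for t in inlier_ts
--         if t['subject_reacted'] and not t['correct_reaction']
--     ]
--     return without_response_ts, correct_ts, incorrect_ts
-- ===== SOURCE B (Python) =====
-- def _partition(ts, key):
--     groups = {False: [], True: []}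
--     for t in ts:
--         groups[bool(t[key])].append(t)
--     return groups[False], groups[True]
--
-- def look_for_response(inlier_ts):
--     without_response_ts, responded_ts = _partition(inlier_ts, 'subject_reacted')
--     incorrect_ts, correct_ts = _partition(responded_ts, 'correct_reaction')
--     return without_response_ts, correct_ts, incorrect_ts
-- ===== Notes on version B (the rewrite author's own statement) =====
-- stated objective: alternative
-- what changed: Replaces the three independent predicate filters over the full list with a two-stage bucket partition: a generic dict-of-buckets partition splits trials by subject_reacted, and a second partition over only the responders splits them by correct_reaction.
import Mathlib
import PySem

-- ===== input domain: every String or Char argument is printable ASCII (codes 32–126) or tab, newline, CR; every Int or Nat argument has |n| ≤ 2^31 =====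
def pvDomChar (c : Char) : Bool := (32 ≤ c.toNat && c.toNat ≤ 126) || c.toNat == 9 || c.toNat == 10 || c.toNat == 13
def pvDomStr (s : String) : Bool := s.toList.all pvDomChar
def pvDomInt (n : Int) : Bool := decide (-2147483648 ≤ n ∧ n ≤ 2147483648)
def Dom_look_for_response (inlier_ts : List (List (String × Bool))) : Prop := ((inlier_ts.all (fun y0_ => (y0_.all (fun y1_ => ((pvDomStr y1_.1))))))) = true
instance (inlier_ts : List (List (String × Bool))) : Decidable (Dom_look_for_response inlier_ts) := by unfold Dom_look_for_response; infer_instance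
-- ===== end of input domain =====

-- B replaces A's three independent predicate filters with a two-stage dict-of-buckets
-- partition (split by subject_reacted, then split the responders by correct_reaction);
-- return value unchanged.

-- t['k'] for a trial dict t (exact where the key exists; Pre_ guarantees that)
def pvKey (t : List (String × Bool)) (k : String) : Bool :=
  ((PySem.Dict.ofList t).get? k).getD false

-- ===== PORT A =====
def look_for_response (inlier_ts : List (List (String × Bool))) : (List (List (String × Bool))) × (List (List (String × Bool))) × (List (List (String × Bool))) :=
  let without_response_ts := inlier_ts.filter (fun t => !(pvKey t "subject_reacted"))
  let correct_ts := inlier_ts.filter (fun t => pvKey t "subject_reacted" && pvKey t "correct_reaction")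
  let incorrect_ts := inlier_ts.filter (fun t => pvKey t "subject_reacted" && !(pvKey t "correct_reaction"))
  (without_response_ts, correct_ts, incorrect_ts)

-- ===== PORT B =====
-- port of Source B's _partition: a dict of two buckets keyed by the boolean, filled in one loop
def pvPartition (ts : List (List (String × Bool))) (key : String) :
    (List (List (String × Bool))) × (List (List (String × Bool))) :=
  let groups := ts.foldl
    (fun g t => g.modify (pvKey t key) [] (· ++ [t]))
    (PySem.Dict.ofList [(false, []), (true, [])])
  (groups.getD false [], groups.getD true [])

def look_for_response_alt (inlier_ts : List (List (String × Bool))) : (List (List (String × Bool))) × (List (List (String × Bool))) × (List (List (String × Bool))) :=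
  let p1 := pvPartition inlier_ts "subject_reacted"
  let p2 := pvPartition p1.2 "correct_reaction"
  (p1.1, p2.2, p2.1)

-- ===== PRECONDITION & SPEC =====
-- Pre_ excludes exactly the inputs where Python A raises KeyError: a trial missing 'subject_reacted',
-- or one whose 'subject_reacted' is true but is missing 'correct_reaction'.
def Pre_look_for_response (inlier_ts : List (List (String × Bool))) : Prop :=
  ∀ t ∈ inlier_ts, (t.any (fun p => p.1 == "subject_reacted")) = true ∧
    (pvKey t "subject_reacted" = true → (t.any (fun p => p.1 == "correct_reaction")) = true)
instance (inlier_ts : List (List (String × Bool))) : Decidable (Pre_look_for_response inlier_ts) := by unfold Pre_look_for_response; infer_instance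

def pvWitness_look_for_response : (List (List (String × Bool))) :=
  [[("subject_reacted", true), ("correct_reaction", false)], [("subject_reacted", false)]]

def Spec_look_for_response (inlier_ts : List (List (String × Bool))) (out : (List (List (String × Bool))) × (List (List (String × Bool))) × (List (List (String × Bool)))) : Prop := out = look_for_response_alt inlier_ts
instance (inlier_ts : List (List (String × Bool))) (out : (List (List (String × Bool))) × (List (List (String × Bool))) × (List (List (String × Bool)))) : Decidable (Spec_look_for_response inlier_ts out) := by unfold Spec_look_for_response; infer_instance

-- ===== CLAIM =====
def Claim_equal_look_for_response : Prop := ∀ (inlier_ts : List (List (String × Bool))), Dom_look_for_response inlier_ts → Pre_look_for_response inlier_ts → Spec_look_for_response inlier_ts (look_for_response inlier_ts)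

-- ===== LEMMAS AND PROOFS =====

-- the bucket loop collects, for each boolean b, exactly the trials whose key evaluates to b,
-- appended in order to whatever the bucket already held
lemma pvPartition_fold_getD (ts : List (List (String × Bool))) (key : String)
    (d : PySem.Dict Bool (List (List (String × Bool)))) (b : Bool) :
    (ts.foldl (fun g t => g.modify (pvKey t key) [] (· ++ [t])) d).getD b [] =
      d.getD b [] ++ ts.filter (fun t => pvKey t key == b) := by
  induction ts generalizing d with
  | nil => simp
  | cons t rest ih =>
    simp only [List.foldl_cons, List.filter_cons, ih, PySem.Dict.getD_modify]
    by_cases h : pvKey t key = b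
    · simp [h]
    · simp [h, Ne.symm h]

lemma pvPartition_eq (ts : List (List (String × Bool))) (key : String) :
    pvPartition ts key =
      (ts.filter (fun t => !(pvKey t key)), ts.filter (fun t => pvKey t key)) := by
  unfold pvPartition
  simp only [pvPartition_fold_getD]
  have h0 : (PySem.Dict.ofList [((false : Bool), ([] : List (List (String × Bool)))), (true, [])]).getD false [] = [] := rfl
  have h1 : (PySem.Dict.ofList [((false : Bool), ([] : List (List (String × Bool)))), (true, [])]).getD true [] = [] := rfl
  rw [h0, h1]
  refine Prod.ext ?_ ?_ <;>
    · simp only [List.nil_append]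
      apply List.filter_congr
      intro t _
      cases pvKey t key <;> simp

-- ===== VERDICT =====
theorem look_for_response_spec : Claim_equal_look_for_response := by
  intro l _ _
  unfold Spec_look_for_response look_for_response look_for_response_alt
  simp only [pvPartition_eq, List.filter_filter]
  refine Prod.ext rfl (Prod.ext ?_ ?_) <;>
    · simp only []
      apply List.filter_congr
      intro t _
      cases h1 : pvKey t "subject_reacted" <;> cases h2 : pvKey t "correct_reaction" <;> simp
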